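-- pv_equiv track=rewrite | github.com/EmKaChuu/Inzynierka | Pomoce/solver_logic.py | generate_cutting_patterns
-- ===== SOURCE A (Python) =====
-- def generate_cutting_patterns(log_length, order_lengths):
--     """
--     Generuje wszystkie możliwe wzory cięcia dla danej długości kłody.
--     """
--     def generate_patterns_recursive(remaining_length, current_pattern, patterns):
--         if sum(current_pattern) > 0:
--             patterns.append(current_pattern.copy())
--
--         for i, length in enumerate(order_lengths):
--             if length <= remaining_length:
--                 current_pattern[i] += 1
--                 generate_patterns_recursive(remaining_length - length, current_pattern, patterns)
--                 current_pattern[i] -= 1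
--
--     patterns = []
--     initial_pattern = [0] * len(order_lengths)
--     generate_patterns_recursive(log_length, initial_pattern, patterns)
--     return patterns
-- ===== SOURCE B (Python) =====
-- def generate_cutting_patterns(log_length, order_lengths):
--     """Iterative DFS with an explicit stack instead of recursion; same pre-order output."""
--     patterns = []
--     stack = [(log_length, [0] * len(order_lengths))]
--     while stack:
--         remaining, pattern = stack.pop()
--         if sum(pattern) > 0:
--             patterns.append(pattern)
--         for i in reversed(range(len(order_lengths))):
--             length = order_lengths[i]
--             if length <= remaining:
--                 child = pattern.copy()
--                 child[i] += 1
--                 stack.append((remaining - length, child))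
--     return patterns
-- ===== Notes on version B (the rewrite author's own statement) =====
-- stated objective: alternative
-- what changed: The recursive backtracking helper that mutates one shared pattern is replaced by an iterative depth-first search over an explicit stack of (remaining_length, pattern) states, pushing children in reverse index order so the same pre-order list of count vectors is produced; Pre_ excludes inputs containing an order length that is nonpositive yet still fits the remaining length, on which A recurses forever (RecursionError).
import Mathlib
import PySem

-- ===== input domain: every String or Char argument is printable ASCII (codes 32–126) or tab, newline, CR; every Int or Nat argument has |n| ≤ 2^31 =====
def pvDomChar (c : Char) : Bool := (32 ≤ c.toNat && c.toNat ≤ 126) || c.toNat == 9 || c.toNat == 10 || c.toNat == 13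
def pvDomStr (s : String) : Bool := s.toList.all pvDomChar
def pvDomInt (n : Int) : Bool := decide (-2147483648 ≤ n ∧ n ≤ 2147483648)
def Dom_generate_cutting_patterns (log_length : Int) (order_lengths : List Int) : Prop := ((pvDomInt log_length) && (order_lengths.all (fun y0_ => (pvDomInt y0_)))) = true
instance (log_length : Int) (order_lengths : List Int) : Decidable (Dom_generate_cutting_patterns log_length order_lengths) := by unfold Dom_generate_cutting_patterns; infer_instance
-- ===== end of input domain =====

-- B replaces A's recursive backtracking (one shared, mutated pattern) by an iterative DFS over an
-- explicit stack of (remaining, pattern) states yielding the same pre-order list: alternative, not faster.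

-- current_pattern[i] += 1 on a fresh copy (i < pattern.length always)
def pvInc (p : List Int) (i : Nat) : List Int := p.set i (p.getD i 0 + 1)

-- ===== PORT A =====
-- A's recursion depth is at most log_length.toNat + 1 on Pre_ inputs; the fuel parameter is only a
-- totality guard (the 0 branch is never reached under Pre_). patterns.append is Array.push.
def pvRecA (ols : List Int) : Nat → Int → List Int → Array (List Int) → Array (List Int)
  | 0, _, _, acc => acc
  | f+1, r, p, acc =>
    let acc1 := if 0 < p.sum then acc.push p else acc
    (List.range ols.length).foldl
      (fun a i => if ols.getD i 0 ≤ r then pvRecA ols f (r - ols.getD i 0) (pvInc p i) a else a)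
      acc1

def generate_cutting_patterns (log_length : Int) (order_lengths : List Int) : List (List Int) :=
  (pvRecA order_lengths (log_length.toNat + 1) log_length
    (List.replicate order_lengths.length 0) #[]).toList

-- ===== PORT B =====
-- termination measure for the stack loop (erased at runtime) and the two lemmas its
-- decreasing_by cites by name
def pvMeas (ols : List Int) (st : List (Int × List Int)) : Nat :=
  (st.map (fun s => (ols.length + 2) ^ (s.1.toNat + 1))).sum

lemma pvFoldr_cons_filter (l : List Nat) (P : Nat → Prop) [DecidablePred P]
    (g : Nat → Int × List Int) (st : List (Int × List Int)) :
    l.foldr (fun a s => if P a then g a :: s else s) st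
      = (l.filter (fun a => decide (P a))).map g ++ st := by
  induction l with
  | nil => simp
  | cons a t ih => by_cases h : P a <;> simp [h, ih]

lemma pvMeas_lt (ols : List Int) (r : Int) (p : List Int) (st : List (Int × List Int)) :
    pvMeas ols (((List.range ols.length).filter
        (fun i => decide (0 < ols.getD i 0 ∧ ols.getD i 0 ≤ r))).map
      (fun i => (r - ols.getD i 0, pvInc p i)) ++ st) < pvMeas ols ((r, p) :: st) := by
  unfold pvMeas
  simp only [List.map_append, List.sum_append, List.map_map, List.map_cons, List.sum_cons]
  have hbound : ∀ x ∈ ((List.range ols.length).filter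
      (fun i => decide (0 < ols.getD i 0 ∧ ols.getD i 0 ≤ r))).map
      ((fun s : Int × List Int => (ols.length + 2) ^ (s.1.toNat + 1)) ∘
        (fun i => (r - ols.getD i 0, pvInc p i))),
      x ≤ (ols.length + 2) ^ r.toNat := by
    intro x hx
    obtain ⟨i, hi, rfl⟩ := List.mem_map.mp hx
    have hps := List.of_mem_filter hi
    simp only [decide_eq_true_eq] at hps
    have h1 : (r - ols.getD i 0).toNat + 1 ≤ r.toNat := by omega
    exact Nat.pow_le_pow_right (by omega) h1
  have hsum := List.sum_le_card_nsmul _ _ hbound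
  have hlen : (((List.range ols.length).filter
      (fun i => decide (0 < ols.getD i 0 ∧ ols.getD i 0 ≤ r))).map
      ((fun s : Int × List Int => (ols.length + 2) ^ (s.1.toNat + 1)) ∘
        (fun i => (r - ols.getD i 0, pvInc p i)))).length ≤ ols.length := by
    rw [List.length_map]
    calc ((List.range ols.length).filter
        (fun i => decide (0 < ols.getD i 0 ∧ ols.getD i 0 ≤ r))).length
        ≤ (List.range ols.length).length := List.length_filter_le _ _
      _ = ols.length := List.length_range ..
  simp only [smul_eq_mul] at hsum
  have h1 : (1 : Nat) ≤ (ols.length + 2) ^ r.toNat := Nat.one_le_pow _ _ (by omega)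
  have hpow : (ols.length + 2) ^ (r.toNat + 1) = (ols.length + 2) ^ r.toNat * (ols.length + 2) :=
    pow_succ _ _
  nlinarith [hsum, hlen, h1]

-- iterative DFS; stack head = top; children pushed in reverse index order (Source B's
-- reversed(range(n)) loop); patterns.append is Array.push. The extra '0 < ols.getD i 0'
-- conjunct in the push test is only a totality guard: Source B loops forever on inputs with a
-- nonpositive piece that fits (outside Pre_), and inside Pre_ any piece that fits is positive.
def pvLoopB (ols : List Int) (st : List (Int × List Int)) (out : Array (List Int)) :
    Array (List Int) :=
  match st with
  | [] => out
  | (r, p) :: st' =>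
    let out1 := if 0 < p.sum then out.push p else out
    let st1 := ((List.range ols.length).reverse).foldl
      (fun s i => if 0 < ols.getD i 0 ∧ ols.getD i 0 ≤ r then (r - ols.getD i 0, pvInc p i) :: s
        else s) st'
    pvLoopB ols st1 out1
termination_by pvMeas ols st
decreasing_by
  have hpush : ((List.range ols.length).reverse).foldl
      (fun s i => if 0 < ols.getD i 0 ∧ ols.getD i 0 ≤ r then (r - ols.getD i 0, pvInc p i) :: s
        else s) st'
      = ((List.range ols.length).filter
          (fun i => decide (0 < ols.getD i 0 ∧ ols.getD i 0 ≤ r))).map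
        (fun i => (r - ols.getD i 0, pvInc p i)) ++ st' := by
    rw [List.foldl_reverse]
    exact pvFoldr_cons_filter (List.range ols.length)
      (fun i => 0 < ols.getD i 0 ∧ ols.getD i 0 ≤ r)
      (fun i => (r - ols.getD i 0, pvInc p i)) st'
  simp only [dite_eq_ite]
  rw [hpush]
  exact pvMeas_lt ols r p st'

def generate_cutting_patterns_alt (log_length : Int) (order_lengths : List Int) : List (List Int) :=
  (pvLoopB order_lengths [(log_length, List.replicate order_lengths.length 0)] #[]).toList

-- ===== PRECONDITION & SPEC =====
-- Pre_ excludes exactly the inputs on which A recurses forever (Python RecursionError): those containing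
-- an order length l ≤ 0 with l ≤ log_length (a nonpositive piece that fits never shrinks the remainder).
def Pre_generate_cutting_patterns (log_length : Int) (order_lengths : List Int) : Prop :=
  ∀ l ∈ order_lengths, 0 < l ∨ log_length < l
instance (log_length : Int) (order_lengths : List Int) : Decidable (Pre_generate_cutting_patterns log_length order_lengths) := by unfold Pre_generate_cutting_patterns; infer_instance

def pvWitness_generate_cutting_patterns : Int × List Int := (7, [2, 3])

def Spec_generate_cutting_patterns (log_length : Int) (order_lengths : List Int) (out : List (List Int)) : Prop := out = generate_cutting_patterns_alt log_length order_lengths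
instance (log_length : Int) (order_lengths : List Int) (out : List (List Int)) : Decidable (Spec_generate_cutting_patterns log_length order_lengths out) := by unfold Spec_generate_cutting_patterns; infer_instance

-- ===== CLAIM (what is proved, stated in full; the proofs are below) =====
def Claim_equal_generate_cutting_patterns : Prop := ∀ (log_length : Int) (order_lengths : List Int), Dom_generate_cutting_patterns log_length order_lengths → Pre_generate_cutting_patterns log_length order_lengths → Spec_generate_cutting_patterns log_length order_lengths (generate_cutting_patterns log_length order_lengths)

-- ===== LEMMAS AND PROOFS =====

-- proof-side spec: the pre-order subtree output of one DFS node (valid children: 0 < l ∧ l ≤ r)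
def pvFlat (ols : List Int) (r : Int) (p : List Int) : List (List Int) :=
  (if 0 < p.sum then [p] else []) ++
  (((List.range ols.length).filter
      (fun i => decide (0 < ols.getD i 0 ∧ ols.getD i 0 ≤ r))).attach.flatMap
    (fun x => pvFlat ols (r - ols.getD x.1 0) (pvInc p x.1)))
termination_by r.toNat
decreasing_by
  have hi := x.2
  simp only [List.mem_filter, List.mem_range, decide_eq_true_eq] at hi
  omega

-- the spec-side child filter (valid pieces: positive and fitting)
def pvPredS (ols : List Int) (r : Int) (i : Nat) : Bool :=
  decide (0 < ols.getD i 0 ∧ ols.getD i 0 ≤ r)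

-- loop invariant carried down the DFS: every piece that fits is positive
def pvHyp (ols : List Int) (r : Int) : Prop := ∀ l ∈ ols, l ≤ r → 0 < l

lemma pvFlat_eq (ols : List Int) (r : Int) (p : List Int) :
    pvFlat ols r p = (if 0 < p.sum then [p] else []) ++
      ((List.range ols.length).filter (pvPredS ols r)).flatMap
        (fun i => pvFlat ols (r - ols.getD i 0) (pvInc p i)) := by
  rw [pvFlat]
  simp only [List.flatMap_subtype, List.unattach_attach]
  rfl

lemma pvGetD_mem (l : List Int) (i : Nat) (h : i < l.length) : l.getD i 0 ∈ l := by
  rw [List.getD_eq_getElem l 0 h]; exact List.getElem_mem h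

lemma pvFlatMap_if (l : List Nat) (pred : Nat → Bool) (g : Nat → List (List Int)) :
    (l.flatMap (fun i => if pred i then g i else [])) = (l.filter pred).flatMap g := by
  induction l with
  | nil => simp
  | cons a t ih => by_cases h : pred a <;> simp [h, ih]

lemma pvHyp_child (ols : List Int) (r l' : Int) (hH : pvHyp ols r) (hpos : 0 < l') :
    pvHyp ols (r - l') := by
  intro l hm hle
  exact hH l hm (by omega)

-- a List.foldl over an Array accumulator, seen through toList
lemma pvToList_foldl (l : List Nat) (F : Array (List Int) → Nat → Array (List Int))
    (G : List (List Int) → Nat → List (List Int))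
    (h : ∀ a i, i ∈ l → (F a i).toList = G a.toList i) :
    ∀ acc : Array (List Int), (l.foldl F acc).toList = l.foldl G acc.toList := by
  induction l with
  | nil => intro acc; simp
  | cons a t ih =>
    intro acc
    simp only [List.foldl_cons]
    rw [← h acc a (List.mem_cons_self ..)]
    exact ih (fun a i hi => h a i (List.mem_cons_of_mem _ hi)) _

-- A's recursion computes the pre-order subtree output, given enough fuel
lemma pvRecA_eq (ols : List Int) : ∀ (f : Nat) (r : Int) (p : List Int) (acc : Array (List Int)),
    pvHyp ols r → r.toNat < f → (pvRecA ols f r p acc).toList = acc.toList ++ pvFlat ols r p := by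
  intro f
  induction f with
  | zero => intro r p acc _ hf; omega
  | succ f ih =>
    intro r p acc hH hf
    rw [pvRecA, pvFlat_eq]
    have hfold := pvToList_foldl (List.range ols.length)
      (fun a i => if ols.getD i 0 ≤ r then pvRecA ols f (r - ols.getD i 0) (pvInc p i) a else a)
      (fun a i => a ++ (if pvPredS ols r i then pvFlat ols (r - ols.getD i 0) (pvInc p i) else []))
      (fun a i hi => by
        dsimp only
        simp only [List.mem_range] at hi
        have hm := pvGetD_mem ols i hi
        by_cases hle : ols.getD i 0 ≤ r
        · have hpos : 0 < ols.getD i 0 := hH _ hm hle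
          have hps : pvPredS ols r i = true := by
            simp only [pvPredS, decide_eq_true_eq]; exact ⟨hpos, hle⟩
          rw [if_pos hle, if_pos hps]
          exact ih (r - ols.getD i 0) (pvInc p i) a (pvHyp_child ols r _ hH hpos) (by omega)
        · have hps : ¬ (pvPredS ols r i = true) := by
            simp only [pvPredS, decide_eq_true_eq]; intro h; exact hle h.2
          rw [if_neg hle, if_neg hps]
          simp)
      (if 0 < p.sum then acc.push p else acc)
    rw [hfold, PySem.List.foldl_append_eq_flatMap, pvFlatMap_if]
    by_cases hs : 0 < p.sum <;> simp [hs, Array.toList_push]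

-- B's stack loop flushes the stack into the concatenated pre-order subtree outputs
lemma pvLoopB_eq (ols : List Int) : ∀ (st : List (Int × List Int)) (out : Array (List Int)),
    (pvLoopB ols st out).toList = out.toList ++ st.flatMap (fun s => pvFlat ols s.1 s.2) := by
  intro st
  induction hm : pvMeas ols st using Nat.strong_induction_on generalizing st with
  | _ m ihm =>
  intro out
  match st with
  | [] => rw [pvLoopB.eq_def]; simp
  | (r, p) :: st' =>
    rw [pvLoopB.eq_def]
    dsimp only
    have hpush : ((List.range ols.length).reverse).foldl
        (fun s i => if 0 < ols.getD i 0 ∧ ols.getD i 0 ≤ r then (r - ols.getD i 0, pvInc p i) :: s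
          else s) st'
        = ((List.range ols.length).filter (pvPredS ols r)).map
          (fun i => (r - ols.getD i 0, pvInc p i)) ++ st' := by
      rw [List.foldl_reverse]
      exact pvFoldr_cons_filter (List.range ols.length)
        (fun i => 0 < ols.getD i 0 ∧ ols.getD i 0 ≤ r)
        (fun i => (r - ols.getD i 0, pvInc p i)) st'
    simp only [hpush]
    have hlt : pvMeas ols (((List.range ols.length).filter (pvPredS ols r)).map
        (fun i => (r - ols.getD i 0, pvInc p i)) ++ st') < m := by
      rw [← hm]; exact pvMeas_lt ols r p st'
    rw [ihm _ hlt _ rfl]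
    rw [List.flatMap_cons, pvFlat_eq, List.flatMap_append, List.flatMap_map]
    by_cases hs : 0 < p.sum <;> simp [hs, Array.toList_push]

-- ===== VERDICT (by name: the statement is the Claim_ definition above) =====
theorem generate_cutting_patterns_spec : Claim_equal_generate_cutting_patterns := by
  intro L ols _ hPre
  unfold Spec_generate_cutting_patterns generate_cutting_patterns generate_cutting_patterns_alt
  have hH : pvHyp ols L := by
    intro l hm hle
    rcases hPre l hm with h | h
    · exact h
    · omega
  rw [pvRecA_eq ols (L.toNat + 1) L (List.replicate ols.length 0) #[] hH (by omega)]
  rw [pvLoopB_eq ols [(L, List.replicate ols.length 0)] #[]]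
  simp
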